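-- pv_equiv track=rewrite | github.com/feiyu1104/TechnicalQA_System | backend/question_parser.py | sql_transfer
-- ===== SOURCE A (Python) =====
-- def sql_transfer(question_type, entities, related_entities=None):
--     if not entities:
--         return []
--     # 查询语句
--     sql = []
--     # 查询成果简介
--     if question_type == 'result_brief':
--         sql = ["MATCH (m:成果) where m.标题 = '{0}' return m.标题, m.成果简介".format(i) for i in entities]
--     # 查询成果时间
--     elif question_type == 'result_time':
--         sql = ["MATCH (m:成果) where m.标题 = '{0}' return m.标题, m.成果公布年份".format(i) for i in entities]
--     # 查询成果领域分类
--     elif question_type == 'result_category':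
--         sql = ["MATCH (m:成果)-[r:属于]->(n:领域分类) where m.标题 = '{0}' return m.标题, n.分类名称".format(i) for i in entities]
--     # 查询成果分布地区
--     elif question_type == '_placeresult':
--         sql = ["MATCH (m:成果)-[r:位于]->(n:省市) where m.标题 = '{0}' return m.标题, n.省市名称".format(i) for i in entities]
--     # 查询成果关键词
--     elif question_type == 'result_keywords':
--         sql = ["MATCH (m:成果)-[r:包含关键词]->(n:关键词) where m.标题 = '{0}' return m.标题, n.关键词文本".format(i) for i in entities]
--     # 查询成果应用行业
--     elif question_type == 'result_applied':
--         sql = ["MATCH (m:成果)-[r:应用于]->(n:应用行业) where m.标题 = '{0}' return m.标题, n.行业名称".format(i) for i in entities]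
--     # 查询成果完成单位
--     elif question_type == 'result_unit':
--         sql = ["MATCH (m:成果)-[r:由完成]->(n:完成单位) where m.标题 = '{0}' return m.标题, n.单位名称".format(i) for i in entities]
--     # 查询相关成果
--     elif question_type == 'result_related':
--         sql = ["MATCH (m:成果)-[r:应用于]->(n:应用行业) where m.标题 = '{0}' return m.标题, n.行业名称".format(i) for i in entities]
--     #查询单位邮政编码
--     elif question_type == 'post_code':
--         sql = ["MATCH (m:联系单位) where m.单位名称 = '{0}' return m.单位名称, m.邮政编码".format(i) for i in entities]
--     # 查询单位成果
--     elif question_type == 'unit_results':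
--         sql = ["MATCH (m:完成单位) WHERE m.单位名称='{0}' OPTIONAL MATCH (m)<-[:由完成]-(n:成果) RETURN m.单位名称, n.标题".format(i) for i in entities]
--     # 查询省份成果
--     elif question_type == 'province_results':
--         sql = ["MATCH (m:省市) WHERE m.省市名称='{0}' OPTIONAL MATCH (m)<-[:位于]-(n:成果) RETURN m.省市名称, n.标题".format(i) for i in entities]
--     # 查询行业技术
--     elif question_type == 'industry_results':
--         sql = ["MATCH (m:应用行业) WHERE m.行业名称='{0}' OPTIONAL MATCH (m)<-[:应用于]-(n:成果) RETURN m.行业名称, n.标题".format(i) for i in entities]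
--     # 查询关键词相关成果
--     elif question_type == 'keyword_results':
--         sql = ["MATCH (m:关键词) WHERE m.关键词文本='{0}' OPTIONAL MATCH (m)<-[:包含关键词]-(n:成果) RETURN m.关键词文本, n.标题".format(i) for i in entities]
--     # 查询领域技术成果
--     elif question_type == 'category_results':
--         sql = ["MATCH (m:领域分类) WHERE m.分类名称='{0}' OPTIONAL MATCH (m)<-[:属于]-(n:成果) RETURN m.分类名称, n.标题".format(i) for i in entities]
--     #通过关键词查询
--     elif question_type == 'keyword_search':
--         sql = ["MATCH (m:成果)-[r:包含关键词]->(n:关键词) where n.关键词文本 = '{0}' return n.关键词文本, m.标题".format(i) for i in entities]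
--     #查询单位的位置
--     elif question_type == 'unit_address':
--         sql = ["MATCH (m:联系单位) where m.单位名称 = '{0}' return m.单位名称, m.联系地址".format(i) for i in entities]
--     # 查询成果详细信息
--     elif question_type == 'result_detail':
--         sql = ["MATCH (m:成果) where m.标题 = '{0}' return m".format(i) for i in entities]
--     #统计类问题
--     elif question_type == 'statistic':
--         sql = ["MATCH (m:成果)-[r:属于]->(n:领域分类) where n.分类名称 = '{0}' return n.分类名称, count(m)".format(i) for i in entities]
--     # 判断性问题 - 成果与单位关系
--     elif question_type == 'result_unit_judge':
--         sql = ["MATCH (m:成果)-[r:由完成]->(n:完成单位) where m.标题 = '{0}' and n.单位名称 = '{1}' return m.标题, n.单位名称".format(entities[0], related_entities[0]) if related_entities else []]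
--     # 判断性问题 - 成果与省份关系
--     elif question_type == 'result_province_judge':
--         sql = ["MATCH (m:成果)-[r:位于]->(n:省市) where m.标题 = '{0}' and n.省市名称 = '{1}' return m.标题, n.省市名称".format(entities[0], related_entities[0]) if related_entities else []]
--     # 判断性问题 - 成果与行业关系
--     elif question_type == 'result_industry_judge':
--         sql = ["MATCH (m:成果)-[r:应用于]->(n:应用行业) where m.标题 = '{0}' and n.行业名称 = '{1}' return m.标题, n.行业名称".format(entities[0], related_entities[0]) if related_entities else []]
--     # 判断性问题 - 成果与关键词关系
--     elif question_type == 'result_keyword_judge':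
--         sql = ["MATCH (m:成果)-[r:包含关键词]->(n:关键词) where m.标题 = '{0}' and n.关键词文本 = '{1}' return m.标题, n.关键词文本".format(entities[0], related_entities[0]) if related_entities else []]
--     # 判断性问题 - 成果与领域分类关系
--     elif question_type == 'result_category_judge':
--         sql = ["MATCH (m:成果)-[r:属于]->(n:领域分类) where m.标题 = '{0}' and n.分类名称 = '{1}' return m.标题, n.分类名称".format(entities[0], related_entities[0]) if related_entities else []]
--     return sql
-- ===== SOURCE B (Python) =====
-- # Schema + query-builder rewrite: each question type maps to a structured spec
-- # (query kind + schema parameters); a renderer assembles the Cypher string from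
-- # those pieces instead of a 25-way if/elif chain of whole-query literals.
--
-- # Relation groups of the knowledge graph: relation name, node label, node property.
-- REL = {
--     'unit': ('由完成', '完成单位', '单位名称'),
--     'province': ('位于', '省市', '省市名称'),
--     'industry': ('应用于', '应用行业', '行业名称'),
--     'keyword': ('包含关键词', '关键词', '关键词文本'),
--     'category': ('属于', '领域分类', '分类名称'),
-- }
--
-- # question type -> (query kind, parameters)
-- SPEC = {
--     'result_brief': ('prop', ('成果', '标题', '成果简介')),
--     'result_time': ('prop', ('成果', '标题', '成果公布年份')),
--     'post_code': ('prop', ('联系单位', '单位名称', '邮政编码')),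
--     'unit_address': ('prop', ('联系单位', '单位名称', '联系地址')),
--     'result_category': ('rel', 'category'),
--     '_placeresult': ('rel', 'province'),
--     'result_keywords': ('rel', 'keyword'),
--     'result_applied': ('rel', 'industry'),
--     'result_unit': ('rel', 'unit'),
--     'result_related': ('rel', 'industry'),
--     'unit_results': ('reverse', 'unit'),
--     'province_results': ('reverse', 'province'),
--     'industry_results': ('reverse', 'industry'),
--     'keyword_results': ('reverse', 'keyword'),
--     'category_results': ('reverse', 'category'),
--     'keyword_search': ('search', 'keyword'),
--     'result_detail': ('detail', None),
--     'statistic': ('stat', 'category'),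
-- }
--
-- # judge question type -> relation group
-- JUDGE = {
--     'result_unit_judge': 'unit',
--     'result_province_judge': 'province',
--     'result_industry_judge': 'industry',
--     'result_keyword_judge': 'keyword',
--     'result_category_judge': 'category',
-- }
--
--
-- def _render_one(spec, e):
--     kind, args = spec
--     if kind == 'prop':
--         label, key, val = args
--         return "MATCH (m:%s) where m.%s = '%s' return m.%s, m.%s" % (label, key, e, key, val)
--     if kind == 'rel':
--         r, nl, np = REL[args]
--         return "MATCH (m:成果)-[r:%s]->(n:%s) where m.标题 = '%s' return m.标题, n.%s" % (r, nl, e, np)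
--     if kind == 'reverse':
--         r, nl, np = REL[args]
--         return "MATCH (m:%s) WHERE m.%s='%s' OPTIONAL MATCH (m)<-[:%s]-(n:成果) RETURN m.%s, n.标题" % (nl, np, e, r, np)
--     if kind == 'search':
--         r, nl, np = REL[args]
--         return "MATCH (m:成果)-[r:%s]->(n:%s) where n.%s = '%s' return n.%s, m.标题" % (r, nl, np, e, np)
--     if kind == 'stat':
--         r, nl, np = REL[args]
--         return "MATCH (m:成果)-[r:%s]->(n:%s) where n.%s = '%s' return n.%s, count(m)" % (r, nl, np, e, np)
--     # kind == 'detail'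
--     return "MATCH (m:成果) where m.标题 = '%s' return m" % e
--
--
-- def sql_transfer(question_type, entities, related_entities=None):
--     if not entities:
--         return []
--     spec = SPEC.get(question_type)
--     if spec is not None:
--         return [_render_one(spec, e) for e in entities]
--     g = JUDGE.get(question_type)
--     if g is not None and related_entities:
--         r, nl, np = REL[g]
--         return ["MATCH (m:成果)-[r:%s]->(n:%s) where m.标题 = '%s' and n.%s = '%s' return m.标题, n.%s"
--                 % (r, nl, entities[0], np, related_entities[0], np)]
--     return []
-- ===== Notes on version B (the rewrite author's own statement) =====
-- stated objective: simpler
-- what changed: Replaces the 25-way if/elif chain of whole-query literals with a structured schema (query kind + relation-group parameters per question type) and a renderer that assembles each Cypher query from node/relation/property pieces.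
-- outside the precondition, e.g. on sql_transfer('result_unit_judge', ['a'], None): A returns [[]], B returns []; on sql_transfer('result_province_judge', ['a'], []): A returns [[]], B returns []
import Mathlib
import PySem

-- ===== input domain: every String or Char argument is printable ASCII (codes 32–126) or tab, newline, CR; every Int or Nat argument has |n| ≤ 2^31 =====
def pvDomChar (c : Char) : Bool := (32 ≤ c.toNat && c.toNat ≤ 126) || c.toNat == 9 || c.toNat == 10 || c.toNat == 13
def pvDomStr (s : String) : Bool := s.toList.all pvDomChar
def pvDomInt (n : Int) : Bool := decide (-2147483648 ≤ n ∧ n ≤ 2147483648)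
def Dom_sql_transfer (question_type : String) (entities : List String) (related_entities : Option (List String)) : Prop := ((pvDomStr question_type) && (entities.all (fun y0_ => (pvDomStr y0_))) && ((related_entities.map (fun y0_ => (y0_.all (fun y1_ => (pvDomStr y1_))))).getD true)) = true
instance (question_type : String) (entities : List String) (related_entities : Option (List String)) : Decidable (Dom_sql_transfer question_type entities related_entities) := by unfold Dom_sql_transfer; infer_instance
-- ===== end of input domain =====

-- B replaces A's 25-way if/elif chain of whole-query literals by a structured schema
-- (query kind + relation-group parameters) and a renderer assembling each query from pieces;
-- objective: simpler. Return values only, no mutation.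
-- '.format'/'%' on these LITERAL templates is exactly concatenation around the placeholders; both ports port it so.

-- ===== PORT A =====
def sql_transfer (question_type : String) (entities : List String) (related_entities : Option (List String)) : List String :=
  match entities with
  | [] => []  -- if not entities: return []
  | e0 :: _ =>
    if question_type = "result_brief" then
      entities.map (fun i => "MATCH (m:成果) where m.标题 = '" ++ i ++ "' return m.标题, m.成果简介")
    else if question_type = "result_time" then
      entities.map (fun i => "MATCH (m:成果) where m.标题 = '" ++ i ++ "' return m.标题, m.成果公布年份")
    else if question_type = "result_category" then
      entities.map (fun i => "MATCH (m:成果)-[r:属于]->(n:领域分类) where m.标题 = '" ++ i ++ "' return m.标题, n.分类名称")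
    else if question_type = "_placeresult" then
      entities.map (fun i => "MATCH (m:成果)-[r:位于]->(n:省市) where m.标题 = '" ++ i ++ "' return m.标题, n.省市名称")
    else if question_type = "result_keywords" then
      entities.map (fun i => "MATCH (m:成果)-[r:包含关键词]->(n:关键词) where m.标题 = '" ++ i ++ "' return m.标题, n.关键词文本")
    else if question_type = "result_applied" then
      entities.map (fun i => "MATCH (m:成果)-[r:应用于]->(n:应用行业) where m.标题 = '" ++ i ++ "' return m.标题, n.行业名称")
    else if question_type = "result_unit" then
      entities.map (fun i => "MATCH (m:成果)-[r:由完成]->(n:完成单位) where m.标题 = '" ++ i ++ "' return m.标题, n.单位名称")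
    else if question_type = "result_related" then
      entities.map (fun i => "MATCH (m:成果)-[r:应用于]->(n:应用行业) where m.标题 = '" ++ i ++ "' return m.标题, n.行业名称")
    else if question_type = "post_code" then
      entities.map (fun i => "MATCH (m:联系单位) where m.单位名称 = '" ++ i ++ "' return m.单位名称, m.邮政编码")
    else if question_type = "unit_results" then
      entities.map (fun i => "MATCH (m:完成单位) WHERE m.单位名称='" ++ i ++ "' OPTIONAL MATCH (m)<-[:由完成]-(n:成果) RETURN m.单位名称, n.标题")
    else if question_type = "province_results" then
      entities.map (fun i => "MATCH (m:省市) WHERE m.省市名称='" ++ i ++ "' OPTIONAL MATCH (m)<-[:位于]-(n:成果) RETURN m.省市名称, n.标题")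
    else if question_type = "industry_results" then
      entities.map (fun i => "MATCH (m:应用行业) WHERE m.行业名称='" ++ i ++ "' OPTIONAL MATCH (m)<-[:应用于]-(n:成果) RETURN m.行业名称, n.标题")
    else if question_type = "keyword_results" then
      entities.map (fun i => "MATCH (m:关键词) WHERE m.关键词文本='" ++ i ++ "' OPTIONAL MATCH (m)<-[:包含关键词]-(n:成果) RETURN m.关键词文本, n.标题")
    else if question_type = "category_results" then
      entities.map (fun i => "MATCH (m:领域分类) WHERE m.分类名称='" ++ i ++ "' OPTIONAL MATCH (m)<-[:属于]-(n:成果) RETURN m.分类名称, n.标题")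
    else if question_type = "keyword_search" then
      entities.map (fun i => "MATCH (m:成果)-[r:包含关键词]->(n:关键词) where n.关键词文本 = '" ++ i ++ "' return n.关键词文本, m.标题")
    else if question_type = "unit_address" then
      entities.map (fun i => "MATCH (m:联系单位) where m.单位名称 = '" ++ i ++ "' return m.单位名称, m.联系地址")
    else if question_type = "result_detail" then
      entities.map (fun i => "MATCH (m:成果) where m.标题 = '" ++ i ++ "' return m")
    else if question_type = "statistic" then
      entities.map (fun i => "MATCH (m:成果)-[r:属于]->(n:领域分类) where n.分类名称 = '" ++ i ++ "' return n.分类名称, count(m)")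
    else if question_type = "result_unit_judge" then
      -- Python: [tpl.format(entities[0], related_entities[0]) if related_entities else []]
      -- the falsy-related case yields [[]] in Python (not a List String); it is outside Pre_
      match related_entities with
      | some (r0 :: _) => ["MATCH (m:成果)-[r:由完成]->(n:完成单位) where m.标题 = '" ++ e0 ++ "' and n.单位名称 = '" ++ r0 ++ "' return m.标题, n.单位名称"]
      | _ => []
    else if question_type = "result_province_judge" then
      -- falsy-related case [[]] outside Pre_
      match related_entities with
      | some (r0 :: _) => ["MATCH (m:成果)-[r:位于]->(n:省市) where m.标题 = '" ++ e0 ++ "' and n.省市名称 = '" ++ r0 ++ "' return m.标题, n.省市名称"]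
      | _ => []
    else if question_type = "result_industry_judge" then
      -- falsy-related case [[]] outside Pre_
      match related_entities with
      | some (r0 :: _) => ["MATCH (m:成果)-[r:应用于]->(n:应用行业) where m.标题 = '" ++ e0 ++ "' and n.行业名称 = '" ++ r0 ++ "' return m.标题, n.行业名称"]
      | _ => []
    else if question_type = "result_keyword_judge" then
      -- falsy-related case [[]] outside Pre_
      match related_entities with
      | some (r0 :: _) => ["MATCH (m:成果)-[r:包含关键词]->(n:关键词) where m.标题 = '" ++ e0 ++ "' and n.关键词文本 = '" ++ r0 ++ "' return m.标题, n.关键词文本"]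
      | _ => []
    else if question_type = "result_category_judge" then
      -- falsy-related case [[]] outside Pre_
      match related_entities with
      | some (r0 :: _) => ["MATCH (m:成果)-[r:属于]->(n:领域分类) where m.标题 = '" ++ e0 ++ "' and n.分类名称 = '" ++ r0 ++ "' return m.标题, n.分类名称"]
      | _ => []
    else []

-- ===== PORT B =====
-- Relation groups of the knowledge graph: (relation name, node label, node property)
def pvRel : PySem.Dict String (String × String × String) :=
  PySem.Dict.ofList [
    ("unit", ("由完成", "完成单位", "单位名称")),
    ("province", ("位于", "省市", "省市名称")),
    ("industry", ("应用于", "应用行业", "行业名称")),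
    ("keyword", ("包含关键词", "关键词", "关键词文本")),
    ("category", ("属于", "领域分类", "分类名称"))
  ]

-- Query kinds of Source B's SPEC values ('prop' carries its own (label,key,val); others carry a group key)
inductive PvSpec where
  | prop : String → String → String → PvSpec
  | rel : String → PvSpec
  | reverse : String → PvSpec
  | search : String → PvSpec
  | stat : String → PvSpec
  | detail : PvSpec
deriving DecidableEq, Repr

def pvSpecTable : PySem.Dict String PvSpec :=
  PySem.Dict.ofList [
    ("result_brief", .prop "成果" "标题" "成果简介"),
    ("result_time", .prop "成果" "标题" "成果公布年份"),
    ("post_code", .prop "联系单位" "单位名称" "邮政编码"),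
    ("unit_address", .prop "联系单位" "单位名称" "联系地址"),
    ("result_category", .rel "category"),
    ("_placeresult", .rel "province"),
    ("result_keywords", .rel "keyword"),
    ("result_applied", .rel "industry"),
    ("result_unit", .rel "unit"),
    ("result_related", .rel "industry"),
    ("unit_results", .reverse "unit"),
    ("province_results", .reverse "province"),
    ("industry_results", .reverse "industry"),
    ("keyword_results", .reverse "keyword"),
    ("category_results", .reverse "category"),
    ("keyword_search", .search "keyword"),
    ("result_detail", .detail),
    ("statistic", .stat "category")
  ]

def pvJudge : PySem.Dict String String :=
  PySem.Dict.ofList [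
    ("result_unit_judge", "unit"),
    ("result_province_judge", "province"),
    ("result_industry_judge", "industry"),
    ("result_keyword_judge", "keyword"),
    ("result_category_judge", "category")
  ]

-- _render_one: assemble the query from schema pieces. REL[args] in Python raises on a
-- missing group key; every group key stored in the tables IS present in pvRel, so getD
-- with a dummy triple is exact on all reachable calls.
def pvRenderOne (spec : PvSpec) (e : String) : String :=
  match spec with
  | .prop label key val =>
      "MATCH (m:" ++ label ++ ") where m." ++ key ++ " = '" ++ e ++ "' return m." ++ key ++ ", m." ++ val
  | .rel g =>
      let (r, nl, np) := (pvRel.get? g).getD ("", "", "")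
      "MATCH (m:成果)-[r:" ++ r ++ "]->(n:" ++ nl ++ ") where m.标题 = '" ++ e ++ "' return m.标题, n." ++ np
  | .reverse g =>
      let (r, nl, np) := (pvRel.get? g).getD ("", "", "")
      "MATCH (m:" ++ nl ++ ") WHERE m." ++ np ++ "='" ++ e ++ "' OPTIONAL MATCH (m)<-[:" ++ r ++ "]-(n:成果) RETURN m." ++ np ++ ", n.标题"
  | .search g =>
      let (r, nl, np) := (pvRel.get? g).getD ("", "", "")
      "MATCH (m:成果)-[r:" ++ r ++ "]->(n:" ++ nl ++ ") where n." ++ np ++ " = '" ++ e ++ "' return n." ++ np ++ ", m.标题"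
  | .stat g =>
      let (r, nl, np) := (pvRel.get? g).getD ("", "", "")
      "MATCH (m:成果)-[r:" ++ r ++ "]->(n:" ++ nl ++ ") where n." ++ np ++ " = '" ++ e ++ "' return n." ++ np ++ ", count(m)"
  | .detail =>
      "MATCH (m:成果) where m.标题 = '" ++ e ++ "' return m"

def sql_transfer_alt (question_type : String) (entities : List String) (related_entities : Option (List String)) : List String :=
  if entities = [] then []  -- if not entities: return []
  else
    match pvSpecTable.get? question_type with
    | some spec => entities.map (fun e => pvRenderOne spec e)
    | none =>
      match pvJudge.get? question_type with
      | some g =>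
        -- 'if g is not None and related_entities:' — truthiness of related_entities
        let rel := related_entities.getD []
        if rel = [] then []
        else
          let (r, nl, np) := (pvRel.get? g).getD ("", "", "")
          -- entities[0] / related_entities[0]: both lists are nonempty here, headD is exact
          ["MATCH (m:成果)-[r:" ++ r ++ "]->(n:" ++ nl ++ ") where m.标题 = '" ++ entities.headD "" ++ "' and n." ++ np ++ " = '" ++ rel.headD "" ++ "' return m.标题, n." ++ np]
      | none => []

-- ===== PRECONDITION & SPEC =====
-- Pre_ excludes only judge-type questions with nonempty entities and falsy related_entities:
-- there A returns [[]] (a list containing an empty LIST, not a string), which is not a value of the declared List[str] type.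
def Pre_sql_transfer (question_type : String) (entities : List String) (related_entities : Option (List String)) : Prop :=
  entities = [] ∨
  ¬ question_type ∈ ["result_unit_judge", "result_province_judge", "result_industry_judge", "result_keyword_judge", "result_category_judge"] ∨
  related_entities.getD [] ≠ []

instance (question_type : String) (entities : List String) (related_entities : Option (List String)) : Decidable (Pre_sql_transfer question_type entities related_entities) := by unfold Pre_sql_transfer; infer_instance

def pvWitness_sql_transfer : String × List String × Option (List String) := ("result_unit_judge", ["t1"], some ["u1"])

def Spec_sql_transfer (question_type : String) (entities : List String) (related_entities : Option (List String)) (out : List String) : Prop := out = sql_transfer_alt question_type entities related_entities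
instance (question_type : String) (entities : List String) (related_entities : Option (List String)) (out : List String) : Decidable (Spec_sql_transfer question_type entities related_entities out) := by unfold Spec_sql_transfer; infer_instance

-- ===== CLAIM =====
def Claim_equal_sql_transfer : Prop := ∀ (question_type : String) (entities : List String) (related_entities : Option (List String)), Dom_sql_transfer question_type entities related_entities → Pre_sql_transfer question_type entities related_entities → Spec_sql_transfer question_type entities related_entities (sql_transfer question_type entities related_entities)

-- ===== LEMMAS AND PROOFS =====

set_option maxHeartbeats 2000000 in
theorem sql_transfer_eq_alt (question_type : String) (entities : List String) (related_entities : Option (List String)) (hpre : Pre_sql_transfer question_type entities related_entities) : sql_transfer question_type entities related_entities = sql_transfer_alt question_type entities related_entities := by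
  rcases entities with _ | ⟨e0, es⟩
  · rfl
  by_cases h0 : question_type = "result_brief"
  · subst h0
    have hS : pvSpecTable.get? "result_brief" = some (.prop "成果" "标题" "成果简介") := by decide
    simp [sql_transfer, sql_transfer_alt, hS, pvRenderOne, String.append_assoc]
  by_cases h1 : question_type = "result_time"
  · subst h1
    have hS : pvSpecTable.get? "result_time" = some (.prop "成果" "标题" "成果公布年份") := by decide
    simp [sql_transfer, sql_transfer_alt, hS, pvRenderOne, String.append_assoc]
  by_cases h2 : question_type = "result_category"
  · subst h2
    have hS : pvSpecTable.get? "result_category" = some (.rel "category") := by decide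
    have hR : pvRel.get? "category" = some ("属于", "领域分类", "分类名称") := by decide
    simp [sql_transfer, sql_transfer_alt, hS, hR, pvRenderOne, String.append_assoc]
  by_cases h3 : question_type = "_placeresult"
  · subst h3
    have hS : pvSpecTable.get? "_placeresult" = some (.rel "province") := by decide
    have hR : pvRel.get? "province" = some ("位于", "省市", "省市名称") := by decide
    simp [sql_transfer, sql_transfer_alt, hS, hR, pvRenderOne, String.append_assoc]
  by_cases h4 : question_type = "result_keywords"
  · subst h4
    have hS : pvSpecTable.get? "result_keywords" = some (.rel "keyword") := by decide
    have hR : pvRel.get? "keyword" = some ("包含关键词", "关键词", "关键词文本") := by decide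
    simp [sql_transfer, sql_transfer_alt, hS, hR, pvRenderOne, String.append_assoc]
  by_cases h5 : question_type = "result_applied"
  · subst h5
    have hS : pvSpecTable.get? "result_applied" = some (.rel "industry") := by decide
    have hR : pvRel.get? "industry" = some ("应用于", "应用行业", "行业名称") := by decide
    simp [sql_transfer, sql_transfer_alt, hS, hR, pvRenderOne, String.append_assoc]
  by_cases h6 : question_type = "result_unit"
  · subst h6
    have hS : pvSpecTable.get? "result_unit" = some (.rel "unit") := by decide
    have hR : pvRel.get? "unit" = some ("由完成", "完成单位", "单位名称") := by decide
    simp [sql_transfer, sql_transfer_alt, hS, hR, pvRenderOne, String.append_assoc]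
  by_cases h7 : question_type = "result_related"
  · subst h7
    have hS : pvSpecTable.get? "result_related" = some (.rel "industry") := by decide
    have hR : pvRel.get? "industry" = some ("应用于", "应用行业", "行业名称") := by decide
    simp [sql_transfer, sql_transfer_alt, hS, hR, pvRenderOne, String.append_assoc]
  by_cases h8 : question_type = "post_code"
  · subst h8
    have hS : pvSpecTable.get? "post_code" = some (.prop "联系单位" "单位名称" "邮政编码") := by decide
    simp [sql_transfer, sql_transfer_alt, hS, pvRenderOne, String.append_assoc]
  by_cases h9 : question_type = "unit_results"
  · subst h9
    have hS : pvSpecTable.get? "unit_results" = some (.reverse "unit") := by decide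
    have hR : pvRel.get? "unit" = some ("由完成", "完成单位", "单位名称") := by decide
    simp [sql_transfer, sql_transfer_alt, hS, hR, pvRenderOne, String.append_assoc]
  by_cases h10 : question_type = "province_results"
  · subst h10
    have hS : pvSpecTable.get? "province_results" = some (.reverse "province") := by decide
    have hR : pvRel.get? "province" = some ("位于", "省市", "省市名称") := by decide
    simp [sql_transfer, sql_transfer_alt, hS, hR, pvRenderOne, String.append_assoc]
  by_cases h11 : question_type = "industry_results"
  · subst h11
    have hS : pvSpecTable.get? "industry_results" = some (.reverse "industry") := by decide
    have hR : pvRel.get? "industry" = some ("应用于", "应用行业", "行业名称") := by decide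
    simp [sql_transfer, sql_transfer_alt, hS, hR, pvRenderOne, String.append_assoc]
  by_cases h12 : question_type = "keyword_results"
  · subst h12
    have hS : pvSpecTable.get? "keyword_results" = some (.reverse "keyword") := by decide
    have hR : pvRel.get? "keyword" = some ("包含关键词", "关键词", "关键词文本") := by decide
    simp [sql_transfer, sql_transfer_alt, hS, hR, pvRenderOne, String.append_assoc]
  by_cases h13 : question_type = "category_results"
  · subst h13
    have hS : pvSpecTable.get? "category_results" = some (.reverse "category") := by decide
    have hR : pvRel.get? "category" = some ("属于", "领域分类", "分类名称") := by decide
    simp [sql_transfer, sql_transfer_alt, hS, hR, pvRenderOne, String.append_assoc]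
  by_cases h14 : question_type = "keyword_search"
  · subst h14
    have hS : pvSpecTable.get? "keyword_search" = some (.search "keyword") := by decide
    have hR : pvRel.get? "keyword" = some ("包含关键词", "关键词", "关键词文本") := by decide
    simp [sql_transfer, sql_transfer_alt, hS, hR, pvRenderOne, String.append_assoc]
  by_cases h15 : question_type = "unit_address"
  · subst h15
    have hS : pvSpecTable.get? "unit_address" = some (.prop "联系单位" "单位名称" "联系地址") := by decide
    simp [sql_transfer, sql_transfer_alt, hS, pvRenderOne, String.append_assoc]
  by_cases h16 : question_type = "result_detail"
  · subst h16
    have hS : pvSpecTable.get? "result_detail" = some (.detail) := by decide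
    simp [sql_transfer, sql_transfer_alt, hS, pvRenderOne, String.append_assoc]
  by_cases h17 : question_type = "statistic"
  · subst h17
    have hS : pvSpecTable.get? "statistic" = some (.stat "category") := by decide
    have hR : pvRel.get? "category" = some ("属于", "领域分类", "分类名称") := by decide
    simp [sql_transfer, sql_transfer_alt, hS, hR, pvRenderOne, String.append_assoc]
  by_cases h18 : question_type = "result_unit_judge"
  · subst h18
    rcases hpre with h | h | h
    · exact absurd h (by simp)
    · exact absurd (by decide) h
    · rcases related_entities with _ | ⟨_ | ⟨r0, rs⟩⟩
      · exact absurd rfl h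
      · exact absurd rfl h
      · have hS : pvSpecTable.get? "result_unit_judge" = none := by decide
        have hJ : pvJudge.get? "result_unit_judge" = some "unit" := by decide
        have hR : pvRel.get? "unit" = some ("由完成", "完成单位", "单位名称") := by decide
        simp [sql_transfer, sql_transfer_alt, hS, hJ, hR, String.append_assoc]
  by_cases h19 : question_type = "result_province_judge"
  · subst h19
    rcases hpre with h | h | h
    · exact absurd h (by simp)
    · exact absurd (by decide) h
    · rcases related_entities with _ | ⟨_ | ⟨r0, rs⟩⟩
      · exact absurd rfl h
      · exact absurd rfl h
      · have hS : pvSpecTable.get? "result_province_judge" = none := by decide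
        have hJ : pvJudge.get? "result_province_judge" = some "province" := by decide
        have hR : pvRel.get? "province" = some ("位于", "省市", "省市名称") := by decide
        simp [sql_transfer, sql_transfer_alt, hS, hJ, hR, String.append_assoc]
  by_cases h20 : question_type = "result_industry_judge"
  · subst h20
    rcases hpre with h | h | h
    · exact absurd h (by simp)
    · exact absurd (by decide) h
    · rcases related_entities with _ | ⟨_ | ⟨r0, rs⟩⟩
      · exact absurd rfl h
      · exact absurd rfl h
      · have hS : pvSpecTable.get? "result_industry_judge" = none := by decide
        have hJ : pvJudge.get? "result_industry_judge" = some "industry" := by decide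
        have hR : pvRel.get? "industry" = some ("应用于", "应用行业", "行业名称") := by decide
        simp [sql_transfer, sql_transfer_alt, hS, hJ, hR, String.append_assoc]
  by_cases h21 : question_type = "result_keyword_judge"
  · subst h21
    rcases hpre with h | h | h
    · exact absurd h (by simp)
    · exact absurd (by decide) h
    · rcases related_entities with _ | ⟨_ | ⟨r0, rs⟩⟩
      · exact absurd rfl h
      · exact absurd rfl h
      · have hS : pvSpecTable.get? "result_keyword_judge" = none := by decide
        have hJ : pvJudge.get? "result_keyword_judge" = some "keyword" := by decide
        have hR : pvRel.get? "keyword" = some ("包含关键词", "关键词", "关键词文本") := by decide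
        simp [sql_transfer, sql_transfer_alt, hS, hJ, hR, String.append_assoc]
  by_cases h22 : question_type = "result_category_judge"
  · subst h22
    rcases hpre with h | h | h
    · exact absurd h (by simp)
    · exact absurd (by decide) h
    · rcases related_entities with _ | ⟨_ | ⟨r0, rs⟩⟩
      · exact absurd rfl h
      · exact absurd rfl h
      · have hS : pvSpecTable.get? "result_category_judge" = none := by decide
        have hJ : pvJudge.get? "result_category_judge" = some "category" := by decide
        have hR : pvRel.get? "category" = some ("属于", "领域分类", "分类名称") := by decide
        simp [sql_transfer, sql_transfer_alt, hS, hJ, hR, String.append_assoc]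
  -- no key matches: both sides are []
  have hT : pvSpecTable.get? question_type = none := by
    rw [PySem.Dict.get?_eq_none_iff_not_mem_keys]
    intro hmem
    rw [show pvSpecTable.keys = ["result_brief", "result_time", "post_code", "unit_address", "result_category", "_placeresult", "result_keywords", "result_applied", "result_unit", "result_related", "unit_results", "province_results", "industry_results", "keyword_results", "category_results", "keyword_search", "result_detail", "statistic"] from by decide] at hmem
    simp only [List.mem_cons, List.not_mem_nil] at hmem
    tauto
  have hJ : pvJudge.get? question_type = none := by
    rw [PySem.Dict.get?_eq_none_iff_not_mem_keys]
    intro hmem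
    rw [show pvJudge.keys = ["result_unit_judge", "result_province_judge", "result_industry_judge", "result_keyword_judge", "result_category_judge"] from by decide] at hmem
    simp only [List.mem_cons, List.not_mem_nil] at hmem
    tauto
  simp [sql_transfer, sql_transfer_alt, hT, hJ, h0, h1, h2, h3, h4, h5, h6, h7, h8, h9, h10, h11, h12, h13, h14, h15, h16, h17, h18, h19, h20, h21, h22]

-- ===== VERDICT =====
theorem sql_transfer_spec : Claim_equal_sql_transfer := by
  intro qt es re _ hpre
  unfold Spec_sql_transfer
  exact sql_transfer_eq_alt qt es re hpre
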